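-- pv_equiv track=rewrite | github.com/muneebsaddal/AI-Business-Automation-Platform | backend/app/tools/lead_tools.py | classify_routing
-- ===== SOURCE A (Python) =====
-- from typing import Any
--
-- def classify_routing(payload: dict[str, Any]) -> dict[str, Any]:
--     """Route a lead based on score and intent."""
--     score = 0
--     for result in reversed(payload.get("previous_results", [])):
--         output = result.get("output_data", {})
--         if "score" in output:
--             score = int(output["score"])
--             break
--
--     if score >= 80:
--         routing = "hot"
--     elif score >= 60:
--         routing = "warm"
--     elif score >= 35:
--         routing = "cold"
--     else:
--         routing = "disqualify"
--
--     return {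
--         "routing": routing,
--         "next_action": {
--             "hot": "Book discovery call within 24 hours",
--             "warm": "Send tailored follow-up and ask qualifying question",
--             "cold": "Add to nurture sequence",
--             "disqualify": "Archive or request more fit information",
--         }[routing],
--     }
-- ===== SOURCE B (Python) =====
-- from typing import Any
--
-- def classify_routing(payload: dict[str, Any]) -> dict[str, Any]:
--     """Route a lead based on score and intent."""
--     outputs = [r.get("output_data", {}) for r in payload.get("previous_results", [])]
--     scores = [int(o["score"]) for o in outputs if "score" in o]
--     score = scores[-1] if scores else 0
--     tiers = [
--         (80, "hot", "Book discovery call within 24 hours"),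
--         (60, "warm", "Send tailored follow-up and ask qualifying question"),
--         (35, "cold", "Add to nurture sequence"),
--     ]
--     for threshold, name, action in tiers:
--         if score >= threshold:
--             return {"routing": name, "next_action": action}
--     return {"routing": "disqualify", "next_action": "Archive or request more fit information"}
-- ===== Notes on version B (the rewrite author's own statement) =====
-- stated objective: simpler
-- what changed: Staged passes that first extract the list of all scores (comprehensions) and take its last element, replacing the reversed scan-with-break, and a data-driven tier table scanned for the first threshold the score meets, replacing the if/elif cascade plus a dict lookup keyed by the routing name.
import Mathlib
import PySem

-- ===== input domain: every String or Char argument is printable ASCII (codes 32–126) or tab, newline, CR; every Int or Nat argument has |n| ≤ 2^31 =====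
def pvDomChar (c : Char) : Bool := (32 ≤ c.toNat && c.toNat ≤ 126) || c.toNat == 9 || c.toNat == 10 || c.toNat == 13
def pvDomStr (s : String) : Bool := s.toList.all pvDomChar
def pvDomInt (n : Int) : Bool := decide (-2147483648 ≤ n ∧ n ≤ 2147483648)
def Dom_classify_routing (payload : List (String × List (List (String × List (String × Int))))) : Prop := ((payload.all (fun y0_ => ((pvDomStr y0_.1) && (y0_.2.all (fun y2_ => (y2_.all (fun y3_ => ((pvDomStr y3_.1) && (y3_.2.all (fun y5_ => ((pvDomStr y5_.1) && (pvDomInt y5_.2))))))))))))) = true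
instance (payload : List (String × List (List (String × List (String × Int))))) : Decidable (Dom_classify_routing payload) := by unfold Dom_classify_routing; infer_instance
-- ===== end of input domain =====

-- B replaces A's reversed-scan-with-break by staged passes (extract all scores, take the last)
-- and the if/elif cascade + dict lookup by a first-match scan over a tier table (objective: simpler).

-- ===== PORT A =====
-- the 'for result in reversed(...)' loop with break: first result (of the reversed list)
-- whose output_data contains "score"; default 0
def pvScoreRevA (rs : List (List (String × List (String × Int)))) : Int :=
  match rs with
  | [] => 0
  | r :: rest =>
    match List.lookup "score" ((List.lookup "output_data" r).getD []) with
    | some v => v            -- score = int(output["score"]); break  (int() is identity on int)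
    | none => pvScoreRevA rest

def classify_routing (payload : List (String × List (List (String × List (String × Int))))) : List (String × String) :=
  let score := pvScoreRevA ((List.lookup "previous_results" payload).getD []).reverse
  let routing : String :=
    if score ≥ 80 then "hot"
    else if score ≥ 60 then "warm"
    else if score ≥ 35 then "cold"
    else "disqualify"
  let next_action :=
    (List.lookup routing
      [("hot", "Book discovery call within 24 hours"),
       ("warm", "Send tailored follow-up and ask qualifying question"),
       ("cold", "Add to nurture sequence"),
       ("disqualify", "Archive or request more fit information")]).getD ""
    -- Python's {...}[routing]: routing is always a key of the literal dict, so no KeyError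
  [("routing", routing), ("next_action", next_action)]

-- ===== PORT B =====
def classify_routing_alt (payload : List (String × List (List (String × List (String × Int))))) : List (String × String) :=
  let outputs := ((List.lookup "previous_results" payload).getD []).map
    (fun r => (List.lookup "output_data" r).getD [])
  -- [int(o["score"]) for o in outputs if "score" in o]
  let scores := outputs.filterMap (fun o => List.lookup "score" o)
  let score := scores.getLast?.getD 0      -- scores[-1] if scores else 0
  let tiers : List (Int × String × String) :=
    [(80, "hot", "Book discovery call within 24 hours"),
     (60, "warm", "Send tailored follow-up and ask qualifying question"),
     (35, "cold", "Add to nurture sequence")]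
  match tiers.find? (fun t => score ≥ t.1) with
  | some (_, name, action) => [("routing", name), ("next_action", action)]
  | none => [("routing", "disqualify"), ("next_action", "Archive or request more fit information")]

-- ===== PRECONDITION & SPEC =====
def Spec_classify_routing (payload : List (String × List (List (String × List (String × Int))))) (out : List (String × String)) : Prop := out = classify_routing_alt payload
instance (payload : List (String × List (List (String × List (String × Int))))) (out : List (String × String)) : Decidable (Spec_classify_routing payload out) := by unfold Spec_classify_routing; infer_instance

-- ===== CLAIM (what is proved, stated in full; the proofs are below) =====
def Claim_equal_classify_routing : Prop := ∀ (payload : List (String × List (List (String × List (String × Int))))), Dom_classify_routing payload → Spec_classify_routing payload (classify_routing payload)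

-- ===== LEMMAS AND PROOFS =====

lemma pvScoreRevA_eq (rs : List (List (String × List (String × Int)))) :
    pvScoreRevA rs
      = (rs.filterMap (fun r => List.lookup "score" ((List.lookup "output_data" r).getD []))).head?.getD 0 := by
  induction rs with
  | nil => rfl
  | cons r rest ih =>
    simp only [pvScoreRevA, List.filterMap_cons]
    cases List.lookup "score" ((List.lookup "output_data" r).getD []) <;> simp [ih]

lemma classify_eq (score : Int) :
    (let routing : String :=
       if score ≥ 80 then "hot"
       else if score ≥ 60 then "warm"
       else if score ≥ 35 then "cold"
       else "disqualify"
     let next_action :=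
       (List.lookup routing
         [("hot", "Book discovery call within 24 hours"),
          ("warm", "Send tailored follow-up and ask qualifying question"),
          ("cold", "Add to nurture sequence"),
          ("disqualify", "Archive or request more fit information")]).getD ""
     ([("routing", routing), ("next_action", next_action)] : List (String × String)))
    =
    (match ([(80, "hot", "Book discovery call within 24 hours"),
             (60, "warm", "Send tailored follow-up and ask qualifying question"),
             (35, "cold", "Add to nurture sequence")] : List (Int × String × String)).find?
             (fun t => score ≥ t.1) with
     | some (_, name, action) => [("routing", name), ("next_action", action)]
     | none => [("routing", "disqualify"), ("next_action", "Archive or request more fit information")]) := by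
  by_cases h80 : score ≥ 80
  · simp [List.find?, h80]
  · by_cases h60 : score ≥ 60
    · simp [List.find?, h80, h60]; rfl
    · by_cases h35 : score ≥ 35
      · simp [List.find?, h80, h60, h35]; rfl
      · simp [List.find?, h80, h60, h35]; rfl

-- ===== VERDICT (by name: the statement is the Claim_ definition above) =====
theorem classify_routing_spec : Claim_equal_classify_routing := by
  intro payload _
  unfold Spec_classify_routing classify_routing classify_routing_alt
  rw [pvScoreRevA_eq, List.filterMap_reverse, List.head?_reverse]
  simp only [List.filterMap_map, Function.comp]
  exact classify_eq _
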